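-- pv_equiv track=rewrite | github.com/lumiere0123/practice_C | PYTHON_CSC108/git/lecture/wk5/feb3_feb9/while_loops.py | find_letter_n_times
-- ===== SOURCE A (Python) =====
-- def find_letter_n_times(s, letter, n):
--     """ (str, str, int) -> str
--
--     Precondition: letter occurs at least n times in s
--
--     Return the smallest substring of s starting from index 0 that contains
--     n occurences of letter.
--
--     >>>find_letter_n_times('Computer Science', 'e', 2)
--     'Computer Scie'
--     """
--
--     i = 0
--     count = 0
--
--     #while count < n: #that's also a valid condition.
--     #But while count <= n is not. Why?
--     while count != n:
--         if s[i] == letter: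
--             count = count + 1
--         i = i + 1
--     return s[:i]
-- ===== SOURCE B (Python) =====
-- def find_letter_n_times(s, letter, n):
--     ends = [0] + [i + 1 for i, ch in enumerate(s) if ch == letter]
--     return s[:ends[n]]
-- ===== Notes on version B (the rewrite author's own statement) =====
-- stated objective: alternative
-- what changed: B does a staged computation: one full pass builds the table of all prefix-lengths ending at each occurrence of letter (with a leading 0), then the answer is a single O(1) table lookup ends[n] and a slice, instead of A's early-terminating scan that maintains a running occurrence counter.
import Mathlib
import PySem

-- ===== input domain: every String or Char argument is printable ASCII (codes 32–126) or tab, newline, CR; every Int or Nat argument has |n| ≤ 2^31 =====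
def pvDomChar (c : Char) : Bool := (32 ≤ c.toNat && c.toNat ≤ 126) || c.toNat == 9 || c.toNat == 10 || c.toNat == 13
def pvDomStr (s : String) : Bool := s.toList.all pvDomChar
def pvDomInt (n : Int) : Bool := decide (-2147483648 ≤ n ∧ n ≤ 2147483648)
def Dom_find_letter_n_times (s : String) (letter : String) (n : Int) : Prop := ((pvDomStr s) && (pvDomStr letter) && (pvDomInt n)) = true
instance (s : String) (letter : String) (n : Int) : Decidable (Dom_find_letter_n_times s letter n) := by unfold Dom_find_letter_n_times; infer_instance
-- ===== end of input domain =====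

-- B replaces A's early-terminating scan-and-count loop by a staged computation: one full
-- pass builds the table of prefix-lengths at every occurrence of letter, then the answer
-- is one table lookup and a slice (alternative decomposition; equal on Pre_; no speed claim).

-- ===== PORT A =====
-- A's while loop: consume s char by char, counting hits, until count == n; return s[:i].
-- The [] case is where Python raises IndexError (excluded by Pre_).
def pvLoopA (letter : List Char) (n : Int) : List Char → Int → Int → Int
  | [], i, _ => i
  | c :: rest, i, count =>
      if count = n then i
      else if [c] = letter then pvLoopA letter n rest (i + 1) (count + 1)
      else pvLoopA letter n rest (i + 1) count

def find_letter_n_times (s : String) (letter : String) (n : Int) : String :=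
  String.ofList (PySem.Chars.slice s.toList none (some (pvLoopA letter.toList n s.toList 0 0)))

-- ===== PORT B =====
-- Source B: ends = [0] + [i + 1 for i, ch in enumerate(s) if ch == letter]; return s[:ends[n]]
-- ends[n] is PySem.List.pyGet?; where Python's indexing raises IndexError it is none
-- (those inputs are outside Pre_) and the port falls back to 0 there.
def find_letter_n_times_alt (s : String) (letter : String) (n : Int) : String :=
  String.ofList (PySem.Chars.slice s.toList none (some ((PySem.List.pyGet?
    (0 :: (PySem.List.enumerate s.toList 0).filterMap
      (fun p => if [p.2] = letter.toList then some (p.1 + 1) else none)) n).getD 0)))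

-- ===== PRECONDITION & SPEC =====
-- Pre_ = exactly the inputs on which the Python A returns normally: n ≥ 0 and, unless
-- n = 0, letter is a single character occurring at least n times in s; on every other
-- input A's while loop runs past the end of s and raises IndexError.
def Pre_find_letter_n_times (s : String) (letter : String) (n : Int) : Prop :=
  0 ≤ n ∧ (n = 0 ∨ (letter.toList.length = 1 ∧
    n ≤ (s.toList.count (letter.toList.headD 'a') : Int)))
instance (s : String) (letter : String) (n : Int) : Decidable (Pre_find_letter_n_times s letter n) := by unfold Pre_find_letter_n_times; infer_instance

def pvWitness_find_letter_n_times : String × String × Int := ("Computer Science", "e", 2)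

def Spec_find_letter_n_times (s : String) (letter : String) (n : Int) (out : String) : Prop := out = find_letter_n_times_alt s letter n
instance (s : String) (letter : String) (n : Int) (out : String) : Decidable (Spec_find_letter_n_times s letter n out) := by unfold Spec_find_letter_n_times; infer_instance

-- ===== CLAIM (what is proved, stated in full; the proofs are below) =====
def Claim_equal_find_letter_n_times : Prop := ∀ (s : String) (letter : String) (n : Int), Dom_find_letter_n_times s letter n → Pre_find_letter_n_times s letter n → Spec_find_letter_n_times s letter n (find_letter_n_times s letter n)

-- ===== LEMMAS AND PROOFS =====

-- length of the shortest prefix of l containing m occurrences of c (proof-side only)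
def pvPref (c : Char) : List Char → Nat → Nat
  | _, 0 => 0
  | [], _ + 1 => 0
  | x :: xs, m + 1 => 1 + pvPref c xs (if x = c then m else m + 1)

theorem pvLoopA_eq (c : Char) (n : Int) (l : List Char) (i count : Int)
    (h1 : count ≤ n) (h2 : n - count ≤ (l.count c : Int)) :
    pvLoopA [c] n l i count = i + ((pvPref c l (n - count).toNat : Nat) : Int) := by
  induction l generalizing i count with
  | nil =>
    have : n = count := by simp at h2; omega
    simp [pvLoopA, this, pvPref]
  | cons x xs ih =>
    by_cases hc : count = n
    · simp [pvLoopA, hc, pvPref]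
    · have hlt : count < n := lt_of_le_of_ne h1 hc
      have hm : (n - count).toNat = (n - count - 1).toNat + 1 := by omega
      by_cases hx : x = c
      · have hcount : (x :: xs).count c = xs.count c + 1 := by simp [hx]
        rw [hcount] at h2; push_cast at h2
        have := ih (i + 1) (count + 1) (by omega) (by omega)
        simp only [pvLoopA, if_neg hc, hx, this, hm, pvPref]
        have : n - (count + 1) = n - count - 1 := by omega
        rw [this]; push_cast; ring
      · have hcount : (x :: xs).count c = xs.count c := by simp [hx]
        rw [hcount] at h2
        have hxl : ¬ ([x] = [c]) := by simp [hx]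
        have := ih (i + 1) count h1 (by omega)
        simp only [pvLoopA, if_neg hc, if_neg hxl, this, hm, pvPref, if_neg hx]
        have h3 : (n - count - 1).toNat + 1 = (n - count).toNat := hm.symm
        rw [h3, hm]; push_cast; ring

-- the occurrence table, B-side: [i+1 for i,ch in enumerate-from-off if ch == c]
def pvOcc (c : Char) : List Char → Int → List Int
  | [], _ => []
  | x :: xs, off => if x = c then (off + 1) :: pvOcc c xs (off + 1) else pvOcc c xs (off + 1)

theorem pvFilterMap_eq_occ (c : Char) (l : List Char) (off : Int) :
    (PySem.List.enumerate l off).filterMap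
        (fun p => if [p.2] = [c] then some (p.1 + 1) else none) = pvOcc c l off := by
  induction l generalizing off with
  | nil => simp [pvOcc]
  | cons x xs ih =>
    simp only [List.cons.injEq, and_true] at ih ⊢
    rw [PySem.List.enumerate_cons, List.filterMap_cons]
    by_cases hx : x = c
    · simp [hx, pvOcc, ih]
    · simp [hx, pvOcc, ih]

theorem pvOcc_get (c : Char) (l : List Char) (off : Int) (m : Nat) (h : m < l.count c) :
    (pvOcc c l off)[m]? = some (off + ((pvPref c l (m + 1) : Nat) : Int)) := by
  induction l generalizing off m with
  | nil => simp at h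
  | cons x xs ih =>
    by_cases hx : x = c
    · have hcount : (x :: xs).count c = xs.count c + 1 := by simp [hx]
      cases m with
      | zero => simp [pvOcc, hx, pvPref]
      | succ m =>
        rw [hcount] at h
        simp only [pvOcc, if_pos hx, List.getElem?_cons_succ]
        rw [ih (off + 1) m (by omega)]
        simp only [pvPref, if_pos hx]
        push_cast; ring_nf
    · have hcount : (x :: xs).count c = xs.count c := by simp [hx]
      rw [hcount] at h
      simp only [pvOcc, if_neg hx]
      rw [ih (off + 1) m h]
      simp only [pvPref, if_neg hx]
      push_cast; ring_nf

theorem pvEnds_get (c : Char) (l : List Char) (m : Nat) (h : m ≤ l.count c) :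
    (0 :: pvOcc c l 0)[m]? = some ((pvPref c l m : Nat) : Int) := by
  cases m with
  | zero => simp [pvPref]
  | succ m =>
    simp only [List.getElem?_cons_succ]
    rw [pvOcc_get c l 0 m (by omega)]
    ring_nf

theorem find_letter_n_times_spec : Claim_equal_find_letter_n_times := by
  intro s letter n _ hpre
  obtain ⟨hn0, hrest⟩ := hpre
  unfold Spec_find_letter_n_times find_letter_n_times find_letter_n_times_alt
  by_cases hz : n = 0
  · subst hz
    have hA : pvLoopA letter.toList 0 s.toList 0 0 = 0 := by
      cases s.toList <;> simp [pvLoopA]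
    rw [hA]
    simp
  · rcases hrest with hz' | ⟨hlen, hcnt⟩
    · exact absurd hz' hz
    · obtain ⟨c, hc⟩ := List.length_eq_one_iff.mp hlen
      rw [hc] at hcnt ⊢
      simp only [List.headD_cons] at hcnt
      have hA := pvLoopA_eq c n s.toList 0 0 hn0 (by simpa using hcnt)
      rw [hA]
      rw [pvFilterMap_eq_occ c s.toList 0]
      have hm : n = ((n.toNat : Nat) : Int) := by omega
      rw [hm, PySem.List.pyGet?_natCast,
        pvEnds_get c s.toList n.toNat (by omega)]
      simp only [Option.getD_some]
      have : (((n.toNat : Nat) : Int) - 0).toNat = n.toNat := by omega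
      rw [this]
      ring_nf
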